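-- pv_equiv track=rewrite | github.com/ansh348/Legal-Knowledge-Graphs | evaluate_graphs.py | get_node_type_from_id
-- ===== SOURCE A (Python) =====
-- def get_node_type_from_id(node_id: str) -> str:
--     """Infer node type from ID prefix."""
--     if node_id == "outcome":
--         return "outcome"
--     prefix_map = {
--         "f": "fact",
--         "c": "concept",
--         "i": "issue",
--         "a": "argument",
--         "h": "holding",
--         "p": "precedent",
--         "js": "justification_set"
--     }
--     for prefix, ntype in prefix_map.items():
--         if node_id.startswith(prefix) and (len(node_id) == len(prefix) + 1 or node_id[len(prefix):].isdigit()):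
--             return ntype
--     return "unknown"
-- ===== SOURCE B (Python) =====
-- def get_node_type_from_id(node_id: str) -> str:
--     """Infer node type from ID prefix, via a character-at-a-time state machine."""
--     if node_id == "outcome":
--         return "outcome"
--     single = {
--         "f": "fact",
--         "c": "concept",
--         "i": "issue",
--         "a": "argument",
--         "h": "holding",
--         "p": "precedent",
--     }
--     # DFA states: START (nothing read), J ('j' read, need 's'), EMPTY (prefix read,
--     # suffix empty so far), DIGITS (suffix is a nonempty digit run), ONE (suffix is
--     # exactly one non-digit character).  Accepting states at end of input: DIGITS, ONE.
--     state = "START"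
--     ntype = "unknown"
--     for ch in node_id:
--         if state == "START":
--             if ch == "j":
--                 state = "J"
--             elif ch in single:
--                 ntype = single[ch]
--                 state = "EMPTY"
--             else:
--                 return "unknown"
--         elif state == "J":
--             if ch == "s":
--                 ntype = "justification_set"
--                 state = "EMPTY"
--             else:
--                 return "unknown"
--         elif state == "EMPTY":
--             state = "DIGITS" if ch.isdigit() else "ONE"
--         elif state == "DIGITS":
--             if not ch.isdigit():
--                 return "unknown"
--         else:  # ONE: a second suffix character can no longer be accepted
--             return "unknown"
--     return ntype if state in ("DIGITS", "ONE") else "unknown"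
-- ===== Notes on version B (the rewrite author's own statement) =====
-- stated objective: alternative
-- what changed: A scans the seven (prefix, type) entries of a map, testing startswith and a suffix condition per entry; B never materialises prefixes or suffixes: it runs a five-state finite state machine over the id one character at a time ('j' pending, empty suffix, digit run, single char), accepting or rejecting at end of input.
import Mathlib
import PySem

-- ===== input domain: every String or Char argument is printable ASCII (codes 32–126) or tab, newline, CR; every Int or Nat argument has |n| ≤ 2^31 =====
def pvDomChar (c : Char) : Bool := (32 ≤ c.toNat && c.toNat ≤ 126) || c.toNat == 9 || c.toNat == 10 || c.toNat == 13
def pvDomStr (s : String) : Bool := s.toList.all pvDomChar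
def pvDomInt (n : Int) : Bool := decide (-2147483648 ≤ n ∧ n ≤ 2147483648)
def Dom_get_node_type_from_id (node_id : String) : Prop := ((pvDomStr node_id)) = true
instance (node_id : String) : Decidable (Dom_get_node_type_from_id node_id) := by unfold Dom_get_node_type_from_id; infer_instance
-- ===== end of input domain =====

-- B replaces A's linear scan over the 7-entry prefix map by a character-at-a-time
-- finite state machine over the id (alternative algorithm); same return values.

-- ===== PORT A =====
-- the 'for prefix, ntype in prefix_map.items():' loop with its early return
def pvScanA (node_id : String) : List (String × String) → String
  | [] => "unknown"
  | (pfx, ntype) :: rest =>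
      if PySem.Str.startswith node_id pfx &&
         (PySem.Str.len node_id == PySem.Str.len pfx + 1 ||
          PySem.Str.strIsdigit (PySem.Str.slice node_id (some (PySem.Str.len pfx)) none))
      then ntype
      else pvScanA node_id rest

def get_node_type_from_id (node_id : String) : String :=
  if node_id == "outcome" then "outcome"
  else
    let prefix_map : PySem.Dict String String :=
      PySem.Dict.ofList [("f", "fact"), ("c", "concept"), ("i", "issue"), ("a", "argument"),
                         ("h", "holding"), ("p", "precedent"), ("js", "justification_set")]
    pvScanA node_id prefix_map.items

-- ===== PORT B =====
-- the dict 'single' of Source B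
def pvSingle : PySem.Dict String String :=
  PySem.Dict.ofList [("f", "fact"), ("c", "concept"), ("i", "issue"), ("a", "argument"),
                     ("h", "holding"), ("p", "precedent")]

-- the DFA states of Source B's loop
inductive PvSt where
  | start | jj | empt | digs | one
deriving DecidableEq

-- Source B's 'for ch in node_id' loop: one step per character, early returns as base cases,
-- final 'return ntype if state in ("DIGITS","ONE") else "unknown"' at the end of input
def pvDfaB : List Char → PvSt → String → String
  | [], st, ntype => if st = PvSt.digs ∨ st = PvSt.one then ntype else "unknown"
  | ch :: cs, PvSt.start, ntype =>
      if ch = 'j' then pvDfaB cs PvSt.jj ntype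
      else
        match PySem.Dict.get? pvSingle (String.ofList [ch]) with
        | some ty => pvDfaB cs PvSt.empt ty
        | none => "unknown"
  | ch :: cs, PvSt.jj, ntype =>
      if ch = 's' then pvDfaB cs PvSt.empt "justification_set" else "unknown"
  | ch :: cs, PvSt.empt, ntype =>
      pvDfaB cs (if PySem.Chars.isdigit ch then PvSt.digs else PvSt.one) ntype
  | ch :: cs, PvSt.digs, ntype =>
      if PySem.Chars.isdigit ch then pvDfaB cs PvSt.digs ntype else "unknown"
  | _ :: _, PvSt.one, _ => "unknown"

def get_node_type_from_id_alt (node_id : String) : String :=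
  if node_id == "outcome" then "outcome"
  else pvDfaB node_id.toList PvSt.start "unknown"

-- ===== PRECONDITION & SPEC =====
def Spec_get_node_type_from_id (node_id : String) (out : String) : Prop := out = get_node_type_from_id_alt node_id
instance (node_id : String) (out : String) : Decidable (Spec_get_node_type_from_id node_id out) := by unfold Spec_get_node_type_from_id; infer_instance

-- ===== CLAIM (what is proved, stated in full; the proofs are below) =====
def Claim_equal_get_node_type_from_id : Prop := ∀ (node_id : String), Dom_get_node_type_from_id node_id → Spec_get_node_type_from_id node_id (get_node_type_from_id node_id)

-- ===== LEMMAS AND PROOFS =====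

theorem pv_str_beq (a b : String) : (a == b) = (a.toList == b.toList) := by
  by_cases h : a = b <;> simp [h, String.toList_inj]

theorem pv_dfa_digs (l : List Char) (t : String) :
    pvDfaB l PvSt.digs t = if l.all PySem.Chars.isdigit then t else "unknown" := by
  induction l with
  | nil => simp [pvDfaB]
  | cons c cs ih =>
    by_cases h : PySem.Chars.isdigit c <;> simp [pvDfaB, h, ih]

theorem pv_dfa_empt (l : List Char) (t : String) :
    pvDfaB l PvSt.empt t = if l.length = 1 ∨ PySem.Chars.strIsdigit l then t else "unknown" := by
  rcases l with _ | ⟨d, cs⟩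
  · simp [pvDfaB, PySem.Chars.strIsdigit]
  · by_cases h : PySem.Chars.isdigit d
    · rcases cs with _ | ⟨e, cs'⟩
      · simp [pvDfaB, h]
      · simp only [pvDfaB, h, if_pos, pv_dfa_digs, PySem.Chars.strIsdigit]
        simp [h]
    · rcases cs with _ | ⟨e, cs'⟩
      · simp [pvDfaB, h]
      · simp [pvDfaB, h, PySem.Chars.strIsdigit]

theorem pv_dfa_suffix (d : Char) (cs : List Char) (t : String) :
    pvDfaB cs (if PySem.Chars.isdigit d then PvSt.digs else PvSt.one) t =
      if cs = [] ∨ PySem.Chars.strIsdigit (d :: cs) then t else "unknown" := by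
  by_cases h : PySem.Chars.isdigit d
  · rcases cs with _ | ⟨e, cs'⟩
    · simp [pvDfaB, h]
    · simp [h, pv_dfa_digs, PySem.Chars.strIsdigit]
  · rcases cs with _ | ⟨e, cs'⟩
    · simp [pvDfaB, h]
    · simp [pvDfaB, h, PySem.Chars.strIsdigit]

theorem pv_single_get (c : Char) :
    PySem.Dict.get? pvSingle (String.ofList [c]) =
      if c = 'f' then some "fact" else if c = 'c' then some "concept"
      else if c = 'i' then some "issue" else if c = 'a' then some "argument"
      else if c = 'h' then some "holding" else if c = 'p' then some "precedent" else none := by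
  have hD6 : pvSingle =
      PySem.Dict.mk [("f", "fact"), ("c", "concept"), ("i", "issue"), ("a", "argument"),
       ("h", "holding"), ("p", "precedent")] := by decide
  rw [hD6]
  simp only [PySem.Dict.get?, pv_str_beq]
  simp only [show ("f" : String).toList = ['f'] from rfl,
    show ("c" : String).toList = ['c'] from rfl, show ("i" : String).toList = ['i'] from rfl,
    show ("a" : String).toList = ['a'] from rfl, show ("h" : String).toList = ['h'] from rfl,
    show ("p" : String).toList = ['p'] from rfl, String.toList_ofList]
  by_cases hf : c = 'f' <;> by_cases hc : c = 'c' <;> by_cases hi : c = 'i' <;>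
    by_cases ha : c = 'a' <;> by_cases hh : c = 'h' <;> by_cases hp : c = 'p' <;> simp_all <;>
    exact ⟨fun h => hf h.symm, fun h => hc h.symm, fun h => hi h.symm, fun h => ha h.symm,
           fun h => hh h.symm, fun h => hp h.symm⟩

set_option maxHeartbeats 1600000 in
theorem pv_main (node_id : String) :
    get_node_type_from_id node_id = get_node_type_from_id_alt node_id := by
  by_cases ho : node_id = "outcome"
  · simp [get_node_type_from_id, get_node_type_from_id_alt, ho]
  · have hbe : (node_id == "outcome") = false := by simp [ho]
    simp only [get_node_type_from_id, get_node_type_from_id_alt, hbe, Bool.false_eq_true,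
      if_false, PySem.Dict.ofList]
    have hD7 : (PySem.Dict.empty.update
        [("f", "fact"), ("c", "concept"), ("i", "issue"), ("a", "argument"), ("h", "holding"),
         ("p", "precedent"), ("js", "justification_set")] : PySem.Dict String String).items =
        [("f", "fact"), ("c", "concept"), ("i", "issue"), ("a", "argument"), ("h", "holding"),
         ("p", "precedent"), ("js", "justification_set")] := by decide
    rw [hD7]
    simp only [pvScanA]
    simp only [PySem.Str.startswith_eq, PySem.Str.len_eq, PySem.Str.strIsdigit_eq,
      PySem.Str.toList_slice, PySem.Chars.slice_eq_listSlice]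
    clear ho hbe hD7
    have s1 : ∀ l : List Char, PySem.List.slice l (some 1) none = l.tail := fun l => by
      simp [PySem.List.slice_from_one]
    have s2 : ∀ l : List Char, PySem.List.slice l (some 2) none = l.drop 2 := fun l => by
      rw [PySem.List.slice_from] <;> simp
    simp only [show ("f" : String).toList = ['f'] from rfl,
      show ("c" : String).toList = ['c'] from rfl, show ("i" : String).toList = ['i'] from rfl,
      show ("a" : String).toList = ['a'] from rfl, show ("h" : String).toList = ['h'] from rfl,
      show ("p" : String).toList = ['p'] from rfl,
      show ("js" : String).toList = ['j', 's'] from rfl, List.length_cons, List.length_nil,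
      Nat.cast_one, zero_add, s1, s2]
    generalize node_id.toList = l
    have hdig0 : PySem.Chars.strIsdigit [] = false := rfl
    rcases l with _ | ⟨c, _ | ⟨d, cs⟩⟩
    · decide
    · -- one-character id: every branch of A fails, every run of B rejects
      simp only [pvDfaB, PySem.Chars.startswith, List.isPrefixOf, pv_single_get, List.tail_cons,
        hdig0]
      by_cases hj : c = 'j'
      · simp [hj, pvDfaB]
      · simp only [hj, if_false]
        by_cases hf : c = 'f' <;> by_cases hc : c = 'c' <;> by_cases hi : c = 'i' <;>
          by_cases ha : c = 'a' <;> by_cases hh : c = 'h' <;> by_cases hp : c = 'p' <;>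
          simp_all [pvDfaB, List.isPrefixOf]
    · -- id of length at least 2
      have hA2 : ((↑cs.length + 1 + 1 : Int) = 2) ↔ cs = [] := by
        rw [← List.length_eq_zero_iff]; omega
      have hA3 : ((↑cs.length + 1 + 1 : Int) = 3) ↔ cs.length = 1 := by omega
      simp only [pvDfaB, PySem.Chars.startswith, List.isPrefixOf, List.isPrefixOf_nil_left,
        Bool.and_true, List.length_cons, List.tail_cons, List.drop_succ_cons, List.drop_zero,
        pv_single_get]
      by_cases hj : c = 'j' <;> by_cases hf : c = 'f' <;> by_cases hcc : c = 'c' <;>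
        by_cases hi : c = 'i' <;> by_cases ha : c = 'a' <;> by_cases hh : c = 'h' <;>
        by_cases hp : c = 'p' <;>
        simp_all [pv_dfa_suffix, pv_dfa_empt, pvDfaB] <;> first
        | (split_ifs <;> simp_all <;> omega)
        | omega
        | (by_cases hd : d = 's' <;> split_ifs <;> simp_all <;>
             (rename_i h; exact absurd h.1.symm (by assumption)))
        | (split_ifs <;> simp_all <;>
             (rename_i h; first
               | exact absurd h.1.symm (by assumption)
               | exact absurd h.1.1.symm (by assumption)))

-- ===== VERDICT (by name: the statement is the Claim_ definition above) =====
theorem get_node_type_from_id_spec : Claim_equal_get_node_type_from_id := by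
  intro node_id _
  unfold Spec_get_node_type_from_id
  exact pv_main node_id
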